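-- pv_equiv track=rewrite | github.com/makinacorpus/makina-states | mc_states/modules/mc_cloud_images.py | guess_template_env
-- ===== SOURCE A (Python) =====
-- DEFAULT_OS = 'ubuntu'
--
-- RELEASES = {
--     'ubuntu': {
--         'default': 'xenial',
--         'releases': ['wily', 'utopic', 'vivid', 'trusty', 'precise']
--     }
--
-- }
--
-- def guess_template_env(name, clone_from=None):
--     if not clone_from:
--         clone_from = ''
--     data = {}
--     os = None
--     for i in RELEASES:
--         if i in name:
--             os = i
--             break
--     if not os:
--         for i in RELEASES:
--             if i in clone_from:
--                 os = i
--                 break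
--     if not os:
--         os = DEFAULT_OS
--     data['os'] = os
--     releases = RELEASES[os]
--     release = None
--     for i in releases['releases']:
--         if i in name:
--             release = i
--             break
--     if not release:
--         for i in releases['releases']:
--             if i in clone_from:
--                 release = i
--                 break
--     if not release:
--         release = releases['default']
--     data['release'] = release
--     return data
-- ===== SOURCE B (Python) =====
-- DEFAULT_OS = 'ubuntu'
--
-- RELEASES = {
--     'ubuntu': {
--         'default': 'xenial',
--         'releases': ['wily', 'utopic', 'vivid', 'trusty', 'precise']
--     }
--
-- }
--
--
-- def guess_template_env(name, clone_from=None):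
--     sources = [name, clone_from or '']
--
--     def best(candidates, default):
--         # Score every candidate at once: rank = index of the first source
--         # containing it (len(sources) if none), then select the minimum
--         # (rank, position) pair instead of staged early-exit scans.
--         scored = [(min((k for k, s in enumerate(sources) if c in s),
--                        default=len(sources)), i)
--                   for i, c in enumerate(candidates)]
--         rank, idx = min(scored)
--         return candidates[idx] if rank < len(sources) else default
--
--     os = best(list(RELEASES), DEFAULT_OS)
--     rel = RELEASES[os]
--     return {'os': os, 'release': best(rel['releases'], rel['default'])}
-- ===== Notes on version B (the rewrite author's own statement) =====
-- stated objective: alternative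
-- what changed: A's four staged early-exit substring scans (os in name, os in clone_from, release in name, release in clone_from) are replaced by a scoring pass that assigns every candidate the index of the first source containing it and then picks the lexicographic minimum (rank, position) pair.
import Mathlib
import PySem

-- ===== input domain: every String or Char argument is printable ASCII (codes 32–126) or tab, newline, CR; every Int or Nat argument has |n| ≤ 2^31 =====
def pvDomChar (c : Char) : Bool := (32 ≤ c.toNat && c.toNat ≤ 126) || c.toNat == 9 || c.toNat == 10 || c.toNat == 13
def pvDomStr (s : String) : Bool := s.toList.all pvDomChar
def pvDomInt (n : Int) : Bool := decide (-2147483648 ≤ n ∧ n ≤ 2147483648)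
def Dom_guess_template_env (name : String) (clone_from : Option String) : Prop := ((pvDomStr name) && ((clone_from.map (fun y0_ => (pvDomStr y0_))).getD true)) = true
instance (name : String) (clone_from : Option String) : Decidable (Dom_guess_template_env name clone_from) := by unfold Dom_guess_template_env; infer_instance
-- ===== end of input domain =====

-- B replaces A's four staged early-exit scans by scoring every candidate with its
-- first matching source index and selecting the lexicographic minimum (rank, position);
-- objective: alternative (same cost, different selection algorithm).

-- ===== PORT A =====
-- RELEASES dict: key ↦ (default, releases)
def pvRELEASES : PySem.Dict String (String × List String) :=
  PySem.Dict.ofList [("ubuntu", ("xenial", ["wily", "utopic", "vivid", "trusty", "precise"]))]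

def pvDEFAULT_OS : String := "ubuntu"

-- 'for i in cands: if i in s: <hit> = i; break'  (used four times inline in A)
def pvLoopA (cands : List String) (s : String) : Option String :=
  match cands with
  | [] => none
  | i :: rest => if PySem.Str.isIn i s then some i else pvLoopA rest s

def guess_template_env (name : String) (clone_from : Option String) : List (String × String) :=
  -- 'if not clone_from: clone_from = '''  (None or '' both become '')
  let clone := match clone_from with | none => "" | some s => s
  let os0 := pvLoopA pvRELEASES.keys name                       -- first os loop (over name)
  let os1 := os0.or (pvLoopA pvRELEASES.keys clone)             -- 'if not os:' second loop (over clone_from)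
  let os := os1.getD pvDEFAULT_OS                               -- 'if not os: os = DEFAULT_OS'
  let releases := pvRELEASES.getD os ("", [])                   -- RELEASES[os] (os is always a key here)
  let r0 := pvLoopA releases.2 name                             -- first release loop (over name)
  let r1 := r0.or (pvLoopA releases.2 clone)                    -- 'if not release:' second loop
  let release := r1.getD releases.1
  [("os", os), ("release", release)]

-- ===== PORT B =====
-- 'min((k for k, s in enumerate(sources) if c in s), default=len(sources))'
def pvScore (sources : List String) (c : String) : Int :=
  (PySem.List.min? (((PySem.List.enumerate sources).filter
      (fun p => PySem.Str.isIn c p.2)).map (fun p => p.1)) (fun x => x)).getD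
    (sources.length : Int)

-- 'scored = [(rank, i) ...]; rank, idx = min(scored); return candidates[idx] if rank < len(sources) else default'
def pvBest (sources candidates : List String) (dflt : String) : String :=
  let scored := (PySem.List.enumerate candidates).map (fun p => (pvScore sources p.2, p.1))
  match PySem.List.min2? scored (fun q => q.1) (fun q => q.2) with
  | some (rank, idx) =>
      if rank < (sources.length : Int) then (PySem.List.pyGet? candidates idx).getD dflt else dflt
  | none => dflt  -- candidates = []: Python's min would raise; both call sites pass non-empty literal lists

def guess_template_env_alt (name : String) (clone_from : Option String) : List (String × String) :=
  let sources := [name, clone_from.getD ""]                     -- 'sources = [name, clone_from or '']'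
  let os := pvBest sources pvRELEASES.keys pvDEFAULT_OS
  let releases := pvRELEASES.getD os ("", [])
  let release := pvBest sources releases.2 releases.1
  [("os", os), ("release", release)]

-- ===== PRECONDITION & SPEC =====
def Spec_guess_template_env (name : String) (clone_from : Option String) (out : List (String × String)) : Prop := out = guess_template_env_alt name clone_from
instance (name : String) (clone_from : Option String) (out : List (String × String)) : Decidable (Spec_guess_template_env name clone_from out) := by unfold Spec_guess_template_env; infer_instance

-- ===== CLAIM (what is proved, stated in full; the proofs are below) =====
def Claim_equal_guess_template_env : Prop := ∀ (name : String) (clone_from : Option String), Dom_guess_template_env name clone_from → Spec_guess_template_env name clone_from (guess_template_env name clone_from)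

-- ===== LEMMAS AND PROOFS =====

-- B's score over the two concrete sources, as nested ifs on the membership booleans
theorem pvScore_two (a b c : String) :
    pvScore [a, b] c =
      if PySem.Str.isIn c a then 0 else if PySem.Str.isIn c b then 1 else 2 := by
  cases h1 : PySem.Chars.isIn c.toList a.toList <;> cases h2 : PySem.Chars.isIn c.toList b.toList <;>
    simp [pvScore, PySem.List.enumerate, PySem.List.min?, h1, h2]

-- the OS pick: with the single candidate "ubuntu" and default "ubuntu", both sides give "ubuntu"
theorem pvBest_os (a b : String) : pvBest [a, b] ["ubuntu"] "ubuntu" = "ubuntu" := by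
  cases h1 : PySem.Chars.isIn ['u', 'b', 'u', 'n', 't', 'u'] a.toList <;>
    cases h2 : PySem.Chars.isIn ['u', 'b', 'u', 'n', 't', 'u'] b.toList <;>
    simp [pvBest, PySem.List.enumerate, pvScore_two, PySem.List.min2?,
      PySem.List.pyGet?, PySem.List.pyIdx?, h1, h2]

theorem pvLoopA_os (a b : String) :
    ((pvLoopA ["ubuntu"] a).or (pvLoopA ["ubuntu"] b)).getD "ubuntu" = "ubuntu" := by
  cases h1 : PySem.Chars.isIn ['u', 'b', 'u', 'n', 't', 'u'] a.toList <;>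
    cases h2 : PySem.Chars.isIn ['u', 'b', 'u', 'n', 't', 'u'] b.toList <;>
    simp [pvLoopA, h1, h2]

-- kernel-checked crunch over the 10 membership booleans of the release selection
theorem pvBoolCrunch : ∀ (b1 b2 b3 b4 b5 c1 c2 c3 c4 c5 : Bool),
    (match
        PySem.List.min2?
          ([((if b1 = true then (0:Int) else if c1 = true then 1 else 2), (0:Int)),
            ((if b2 = true then (0:Int) else if c2 = true then 1 else 2), (0:Int) + 1),
            ((if b3 = true then (0:Int) else if c3 = true then 1 else 2), (0:Int) + 1 + 1),
            ((if b4 = true then (0:Int) else if c4 = true then 1 else 2), (0:Int) + 1 + 1 + 1),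
            ((if b5 = true then (0:Int) else if c5 = true then 1 else 2), (0:Int) + 1 + 1 + 1 + 1)] :
            List (Int × Int))
          (fun q => q.1) (fun q => q.2) with
      | some (rank, idx) =>
        if rank < (2:Int) then (PySem.List.pyGet? ["wily", "utopic", "vivid", "trusty", "precise"] idx).getD "xenial"
        else "xenial"
      | none => "xenial") =
      ((if b1 = true then some "wily"
              else
                if b2 = true then some "utopic"
                else
                  if b3 = true then some "vivid"
                  else if b4 = true then some "trusty" else if b5 = true then some "precise" else none).or
            (if c1 = true then some "wily"
            else
              if c2 = true then some "utopic"
              else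
                if c3 = true then some "vivid"
                else if c4 = true then some "trusty" else if c5 = true then some "precise" else none)).getD
        "xenial" := by decide

-- the release pick: min-of-scores selection equals A's staged first-match scans
theorem pvBest_releases (a b : String) :
    pvBest [a, b] ["wily", "utopic", "vivid", "trusty", "precise"] "xenial" =
      ((pvLoopA ["wily", "utopic", "vivid", "trusty", "precise"] a).or
        (pvLoopA ["wily", "utopic", "vivid", "trusty", "precise"] b)).getD "xenial" := by
  simp only [pvBest, pvLoopA, PySem.List.enumerate, List.map, pvScore_two,
    List.length_cons, List.length_nil, Nat.reduceAdd, Nat.cast_ofNat]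
  generalize PySem.Str.isIn "wily" a = b1
  generalize PySem.Str.isIn "utopic" a = b2
  generalize PySem.Str.isIn "vivid" a = b3
  generalize PySem.Str.isIn "trusty" a = b4
  generalize PySem.Str.isIn "precise" a = b5
  generalize PySem.Str.isIn "wily" b = c1
  generalize PySem.Str.isIn "utopic" b = c2
  generalize PySem.Str.isIn "vivid" b = c3
  generalize PySem.Str.isIn "trusty" b = c4
  generalize PySem.Str.isIn "precise" b = c5
  exact pvBoolCrunch b1 b2 b3 b4 b5 c1 c2 c3 c4 c5

-- ===== VERDICT (by name: the statement is the Claim_ definition above) =====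
theorem guess_template_env_spec : Claim_equal_guess_template_env := by
  intro name clone_from _
  unfold Spec_guess_template_env
  cases clone_from <;>
    simp only [guess_template_env, guess_template_env_alt, Option.getD_none, Option.getD_some] <;>
    rw [show pvRELEASES.keys = ["ubuntu"] from rfl, show pvDEFAULT_OS = "ubuntu" from rfl,
      pvBest_os, pvLoopA_os] <;>
    rw [show pvRELEASES.getD "ubuntu" ("", []) = ("xenial", ["wily", "utopic", "vivid", "trusty", "precise"]) from rfl] <;>
    rw [pvBest_releases]
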